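-- pv_equiv track=rewrite | github.com/lucasHENNEUSE/isen_miskatonic | bdd/populate_mongo.py | normalize_correct
-- ===== SOURCE A (Python) =====
-- from typing import Dict, Iterator, List, Optional, Any
--
-- def normalize_correct(v: Optional[str]) -> Optional[List[str]]:
--     """
--     Normalisation du champ 'correct'
--     """
--     if v is None:
--         return []
--
--     txt = v.strip().upper()
--     if not txt:
--         return []
--     txt = txt.replace(",", " ").replace("-", " ")
--     parts = [p for p in txt.split() if p]
--
--     return parts
-- ===== SOURCE B (Python) =====
-- from typing import List, Optional
--
--
-- def normalize_correct(v: "Optional[str]") -> "Optional[List[str]]":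
--     """
--     Normalisation du champ 'correct'
--     """
--     if v is None:
--         return []
--     out = []
--     buf = []
--     for ch in v.upper():
--         if ch == "," or ch == "-" or ch.isspace():
--             if buf:
--                 out.append("".join(buf))
--                 buf = []
--         else:
--             buf.append(ch)
--     if buf:
--         out.append("".join(buf))
--     return out
-- ===== Notes on version B (the rewrite author's own statement) =====
-- stated objective: alternative
-- what changed: A normalizes by strip/upper, two string replace passes (comma and hyphen to spaces), then str.split() plus a filter; B makes a single character scan over the uppercased string with a token buffer, flushing on comma, hyphen or whitespace, so no intermediate replaced strings are built.
import Mathlib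
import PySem

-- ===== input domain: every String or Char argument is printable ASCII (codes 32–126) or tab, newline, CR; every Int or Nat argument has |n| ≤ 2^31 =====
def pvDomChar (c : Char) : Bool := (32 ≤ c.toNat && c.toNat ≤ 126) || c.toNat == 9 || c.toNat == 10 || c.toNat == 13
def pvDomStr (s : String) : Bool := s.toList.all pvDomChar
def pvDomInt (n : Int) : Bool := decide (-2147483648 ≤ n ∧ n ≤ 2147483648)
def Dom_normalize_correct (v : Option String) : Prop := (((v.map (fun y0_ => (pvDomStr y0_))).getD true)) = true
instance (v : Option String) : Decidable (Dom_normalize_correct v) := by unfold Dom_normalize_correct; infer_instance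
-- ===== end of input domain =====

-- B replaces A's replace-then-split pipeline by a single character scan with a token buffer (different decomposition).

-- ===== PORT A =====
def normalize_correct (v : Option String) : List String :=
  match v with
  | none => []
  | some s =>
    let txt := PySem.Str.upper (PySem.Str.strip s)
    if txt = "" then []
    else
      let txt2 := PySem.Str.replace (PySem.Str.replace txt "," " ") "-" " "
      (PySem.Str.split₀ txt2).filter (fun p => !(p == ""))

-- ===== PORT B =====
def ncDelim (c : Char) : Bool := c == ',' || c == '-' || PySem.Chars.isspace c

def ncScan : List Char → List Char → List String → List String
  | [], buf, out => if buf.isEmpty then out else out ++ [String.ofList buf]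
  | c :: rest, buf, out =>
    if ncDelim c then
      if buf.isEmpty then ncScan rest [] out
      else ncScan rest [] (out ++ [String.ofList buf])
    else ncScan rest (buf ++ [c]) out

def normalize_correct_alt (v : Option String) : List String :=
  match v with
  | none => []
  | some s => ncScan (PySem.Str.upper s).toList [] []

-- ===== PRECONDITION & SPEC =====
def Spec_normalize_correct (v : Option String) (out : List String) : Prop := out = normalize_correct_alt v
instance (v : Option String) (out : List String) : Decidable (Spec_normalize_correct v out) := by unfold Spec_normalize_correct; infer_instance

-- ===== CLAIM (what is proved, stated in full; the proofs are below) =====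
def Claim_equal_normalize_correct : Prop := ∀ (v : Option String), Dom_normalize_correct v → Spec_normalize_correct v (normalize_correct v)

-- ===== LEMMAS AND PROOFS =====

-- the character substitution performed by A's two `replace` calls
def gsub (c : Char) : Char := if c = ',' then ' ' else if c = '-' then ' ' else c

theorem ws_islower (c : Char) (h : PySem.Chars.isspace c = true) :
    PySem.Chars.islower c = false := by
  simp only [PySem.Chars.isspace, Bool.or_eq_true, Bool.and_eq_true, decide_eq_true_eq] at h
  simp only [PySem.Chars.islower, Bool.and_eq_false_iff, decide_eq_false_iff_not, Char.le_def,
    UInt32.le_iff_toNat_le]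
  have hc : Char.toNat c = c.val.toNat := rfl
  have ha : ('a').val.toNat = 97 := by decide
  have hz : ('z').val.toNat = 122 := by decide
  rw [hc] at h
  rw [ha, hz]
  omega

theorem ws_upperChar (c : Char) (h : PySem.Chars.isspace c = true) :
    PySem.Chars.upperChar c = c := by
  simp [PySem.Chars.upperChar, ws_islower c h]

theorem ws_gsub (c : Char) (h : PySem.Chars.isspace c = true) : gsub c = c := by
  have h1 : c ≠ ',' := by rintro rfl; simp [PySem.Chars.isspace] at h
  have h2 : c ≠ '-' := by rintro rfl; simp [PySem.Chars.isspace] at h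
  simp [gsub, h1, h2]

theorem delim_iff (c : Char) : ncDelim c = PySem.Chars.isspace (gsub c) := by
  by_cases h1 : c = ','
  · subst h1; decide
  by_cases h2 : c = '-'
  · subst h2; decide
  simp [ncDelim, gsub, h1, h2]

theorem gsub_of_not_delim (c : Char) (h : ncDelim c = false) : gsub c = c := by
  simp only [ncDelim, Bool.or_eq_false_iff, beq_eq_false_iff_ne, ne_eq] at h
  simp [gsub, h.1.1, h.1.2]

theorem replace_go_single (o n : Char) :
    ∀ (l : List Char) (fuel : Nat) (acc : List Char), l.length ≤ fuel →
      PySem.Chars.replace.go [o] [n] fuel l acc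
        = acc.reverse ++ l.map (fun c => if c = o then n else c) := by
  intro l
  induction l with
  | nil =>
    intro fuel acc _
    cases fuel <;> simp [PySem.Chars.replace.go]
  | cons c t ih =>
    intro fuel acc hle
    cases fuel with
    | zero => simp at hle
    | succ f =>
      simp only [PySem.Chars.replace.go]
      by_cases hco : o = c
      · subst hco
        have hpre : [o].isPrefixOf (o :: t) = true := by simp [List.isPrefixOf]
        simp only [hpre, if_true]
        have hdrop : List.drop [o].length (o :: t) = t := by simp
        rw [hdrop, ih f _ (by simp at hle; omega)]
        simp
      · have hpre : [o].isPrefixOf (c :: t) = false := by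
          simp [List.isPrefixOf, beq_eq_false_iff_ne, hco]
        simp only [hpre, Bool.false_eq_true, if_false]
        rw [ih f _ (by simp at hle; omega)]
        simp [if_neg (fun h : c = o => hco h.symm)]

theorem replace_single (cs : List Char) (o n : Char) :
    PySem.Chars.replace cs [o] [n] = cs.map (fun c => if c = o then n else c) := by
  simp only [PySem.Chars.replace, List.isEmpty_cons, if_false, Bool.false_eq_true]
  exact replace_go_single o n cs cs.length [] (le_refl _)

theorem replace_two (cs : List Char) :
    PySem.Chars.replace (PySem.Chars.replace cs [','] [' ']) ['-'] [' '] = cs.map gsub := by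
  rw [replace_single, replace_single, List.map_map]
  apply List.map_congr_left
  intro c _
  by_cases h1 : c = ','
  · subst h1; decide
  by_cases h2 : c = '-'
  · subst h2; decide
  simp [gsub, h1, h2]

-- B's scan equals A's whitespace splitter applied to the gsub-image of the same characters
theorem scan_eq_go : ∀ (cs cur : List Char) (acc : List (List Char)),
    ncScan cs cur.reverse (acc.reverse.map String.ofList)
      = (PySem.Chars.split₀.go (cs.map gsub) cur acc).map String.ofList := by
  intro cs
  induction cs with
  | nil =>
    intro cur acc
    simp only [List.map_nil, PySem.Chars.split₀.go, ncScan]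
    by_cases h : cur.isEmpty
    · simp [h]
    · simp only [List.isEmpty_reverse, h, if_false, Bool.false_eq_true]
      simp
  | cons c rest ih =>
    intro cur acc
    simp only [List.map_cons, PySem.Chars.split₀.go, ncScan, delim_iff c]
    by_cases hd : PySem.Chars.isspace (gsub c) = true
    · simp only [hd, if_true]
      by_cases hc : cur.isEmpty
      · have : cur = [] := by simpa using hc
        subst this
        simpa using ih [] acc
      · simp only [List.isEmpty_reverse, hc, if_false, Bool.false_eq_true]
        have := ih [] (cur.reverse :: acc)
        simpa using this
    · simp only [Bool.not_eq_true] at hd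
      simp only [hd, if_false, Bool.false_eq_true]
      rw [gsub_of_not_delim c (by rw [delim_iff]; exact hd)]
      have := ih (c :: cur) acc
      simpa using this

theorem go_pieces_ne_nil : ∀ (cs cur : List Char) (acc : List (List Char)),
    (∀ p ∈ acc, p ≠ []) →
    ∀ p ∈ PySem.Chars.split₀.go cs cur acc, p ≠ [] := by
  intro cs
  induction cs with
  | nil =>
    intro cur acc hacc p hp
    simp only [PySem.Chars.split₀.go] at hp
    by_cases hc : cur.isEmpty
    · simp [hc] at hp
      exact hacc p (by simpa using hp)
    · simp only [hc, if_false, Bool.false_eq_true, List.reverse_cons, List.mem_append] at hp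
      rcases hp with hp | hp
      · exact hacc p (by simpa using hp)
      · have : p = cur.reverse := by simpa using hp
        subst this
        simp at hc ⊢
        exact hc
  | cons c rest ih =>
    intro cur acc hacc p hp
    simp only [PySem.Chars.split₀.go] at hp
    by_cases hd : PySem.Chars.isspace c = true
    · simp only [hd, if_true] at hp
      by_cases hc : cur.isEmpty
      · simp only [hc, if_true] at hp
        exact ih [] acc hacc p hp
      · simp only [hc, if_false, Bool.false_eq_true] at hp
        refine ih [] (cur.reverse :: acc) ?_ p hp
        intro q hq
        rcases List.mem_cons.mp hq with rfl | hq
        · simp at hc ⊢; exact hc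
        · exact hacc q hq
    · simp only [Bool.not_eq_true] at hd
      simp only [hd, if_false, Bool.false_eq_true] at hp
      exact ih (c :: cur) acc hacc p hp

theorem go_all_ws : ∀ (ws cur : List Char) (acc : List (List Char)),
    (∀ c ∈ ws, PySem.Chars.isspace c = true) →
    PySem.Chars.split₀.go ws cur acc = PySem.Chars.split₀.go [] cur acc := by
  intro ws
  induction ws with
  | nil => intro cur acc _; rfl
  | cons c rest ih =>
    intro cur acc hws
    have hc : PySem.Chars.isspace c = true := hws c (List.mem_cons_self ..)
    have hrest : ∀ d ∈ rest, PySem.Chars.isspace d = true :=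
      fun d hd => hws d (List.mem_cons_of_mem _ hd)
    simp only [PySem.Chars.split₀.go, hc, if_true]
    by_cases hcur : cur.isEmpty
    · have : cur = [] := by simpa using hcur
      subst this
      simp only [hcur, if_true]
      rw [ih [] acc hrest]
      simp [PySem.Chars.split₀.go]
    · simp only [hcur, if_false, Bool.false_eq_true]
      rw [ih [] (cur.reverse :: acc) hrest]
      simp [PySem.Chars.split₀.go]

theorem go_append_ws : ∀ (xs ws cur : List Char) (acc : List (List Char)),
    (∀ c ∈ ws, PySem.Chars.isspace c = true) →
    PySem.Chars.split₀.go (xs ++ ws) cur acc = PySem.Chars.split₀.go xs cur acc := by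
  intro xs
  induction xs with
  | nil =>
    intro ws cur acc hws
    simpa using go_all_ws ws cur acc hws
  | cons c rest ih =>
    intro ws cur acc hws
    simp only [List.cons_append, PySem.Chars.split₀.go]
    by_cases hd : PySem.Chars.isspace c = true
    · simp only [hd, if_true]
      by_cases hcur : cur.isEmpty
      · simp only [hcur, if_true]; exact ih ws [] acc hws
      · simp only [hcur, if_false, Bool.false_eq_true]; exact ih ws [] (cur.reverse :: acc) hws
    · simp only [Bool.not_eq_true] at hd
      simp only [hd, if_false, Bool.false_eq_true]
      exact ih ws (c :: cur) acc hws

-- dropping a whitespace prefix does not change the split (image under a map h that fixes whitespace)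
theorem split₀_dropWhile (h : Char → Char)
    (hfix : ∀ c, PySem.Chars.isspace c = true → h c = c) :
    ∀ cs : List Char,
      PySem.Chars.split₀ ((cs.dropWhile PySem.Chars.isspace).map h)
        = PySem.Chars.split₀ (cs.map h) := by
  intro cs
  induction cs with
  | nil => rfl
  | cons c rest ih =>
    by_cases hd : PySem.Chars.isspace c = true
    · rw [List.dropWhile_cons_of_pos (by simpa using hd)]
      rw [ih]
      simp only [List.map_cons, PySem.Chars.split₀, PySem.Chars.split₀.go, hfix c hd, hd, if_true,
        List.isEmpty_nil]
    · rw [List.dropWhile_cons_of_neg (by simpa using hd)]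

-- the composed per-character transformation A applies: uppercase then gsub
def Gc (c : Char) : Char := gsub (PySem.Chars.upperChar c)

theorem ws_Gc (c : Char) (h : PySem.Chars.isspace c = true) : Gc c = c := by
  simp [Gc, ws_upperChar c h, ws_gsub c h]

theorem split₀_strip (cs : List Char) :
    PySem.Chars.split₀ ((PySem.Chars.strip cs).map Gc)
      = PySem.Chars.split₀ (cs.map Gc) := by
  have key : ∀ ys : List Char,
      PySem.Chars.split₀ ((PySem.Chars.rstrip ys).map Gc) = PySem.Chars.split₀ (ys.map Gc) := by
    intro ys
    have hdec : ys = PySem.Chars.rstrip ys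
        ++ (ys.reverse.takeWhile PySem.Chars.isspace).reverse := by
      have h := List.takeWhile_append_dropWhile (p := PySem.Chars.isspace) (l := ys.reverse)
      calc ys = ys.reverse.reverse := (List.reverse_reverse ys).symm
        _ = (List.takeWhile PySem.Chars.isspace ys.reverse
              ++ List.dropWhile PySem.Chars.isspace ys.reverse).reverse := by rw [h]
        _ = _ := by rw [List.reverse_append]; rfl
    conv_rhs => rw [hdec]
    rw [List.map_append]
    unfold PySem.Chars.split₀
    rw [go_append_ws]
    intro c hc
    simp only [List.mem_map] at hc
    obtain ⟨d, hd, rfl⟩ := hc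
    have hdw : PySem.Chars.isspace d = true := by
      have := List.mem_reverse.mp hd
      exact List.mem_takeWhile_imp this
    rw [ws_Gc d hdw]; exact hdw
  calc PySem.Chars.split₀ ((PySem.Chars.strip cs).map Gc)
      = PySem.Chars.split₀ ((PySem.Chars.lstrip cs).map Gc) := key _
    _ = PySem.Chars.split₀ (cs.map Gc) := split₀_dropWhile Gc (fun c h => ws_Gc c h) cs

-- B's value on `some s`, expressed through A's splitter
theorem alt_eq (s : String) :
    normalize_correct_alt (some s)
      = ((PySem.Chars.split₀ (((PySem.Chars.strip s.toList).map PySem.Chars.upperChar).map gsub)).map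
          String.ofList) := by
  show ncScan (PySem.Str.upper s).toList [] [] = _
  rw [PySem.Str.toList_upper]
  have h1 := scan_eq_go (PySem.Chars.upper s.toList) [] []
  simp only [List.reverse_nil, List.map_nil] at h1
  rw [h1]
  unfold PySem.Chars.split₀
  have h2 : (PySem.Chars.upper s.toList).map gsub = s.toList.map Gc := by
    simp only [PySem.Chars.upper, List.map_map]
    exact List.map_congr_left fun a _ => rfl
  have h3 : ((PySem.Chars.strip s.toList).map PySem.Chars.upperChar).map gsub
      = (PySem.Chars.strip s.toList).map Gc := by
    simp only [List.map_map]
    exact List.map_congr_left fun a _ => rfl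
  rw [h2, h3]
  have := split₀_strip s.toList
  unfold PySem.Chars.split₀ at this
  rw [this]

-- ===== VERDICT (by name: the statement is the Claim_ definition above) =====
theorem normalize_correct_spec : Claim_equal_normalize_correct := by
  unfold Claim_equal_normalize_correct
  intro v _
  unfold Spec_normalize_correct
  match v with
  | none => rfl
  | some s =>
    rw [alt_eq s]
    simp only [normalize_correct]
    by_cases he : PySem.Str.upper (PySem.Str.strip s) = ""
    · rw [if_pos he]
      have : (PySem.Str.upper (PySem.Str.strip s)).toList = [] := by rw [he]; rfl
      rw [PySem.Str.toList_upper, PySem.Str.toList_strip] at this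
      simp only [PySem.Chars.upper] at this
      have hnil : PySem.Chars.strip s.toList = [] := by simpa using this
      rw [hnil]
      rfl
    · rw [if_neg he]
      have htl : (PySem.Str.replace (PySem.Str.replace
            (PySem.Str.upper (PySem.Str.strip s)) "," " ") "-" " ").toList
          = ((PySem.Chars.strip s.toList).map PySem.Chars.upperChar).map gsub := by
        rw [PySem.Str.toList_replace, PySem.Str.toList_replace, PySem.Str.toList_upper,
          PySem.Str.toList_strip]
        have h1 : (",".toList, " ".toList, "-".toList) = ([','], [' '], ['-']) := by decide
        simp only [Prod.mk.injEq] at h1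
        rw [h1.1, h1.2.1, h1.2.2]
        rw [replace_two]
        simp [PySem.Chars.upper]
      set t := PySem.Str.replace (PySem.Str.replace
        (PySem.Str.upper (PySem.Str.strip s)) "," " ") "-" " " with ht
      have hpieces : ∀ p ∈ PySem.Str.split₀ t, p ≠ "" := by
        intro p hp hpe
        have hmem : p.toList ∈ PySem.Chars.split₀ t.toList := by
          rw [← PySem.Str.split₀_map_toList]
          exact List.mem_map_of_mem hp
        have := go_pieces_ne_nil t.toList [] [] (by simp) p.toList hmem
        subst hpe
        exact this rfl
      have hfilter : (PySem.Str.split₀ t).filter (fun p => !(p == "")) = PySem.Str.split₀ t := by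
        apply List.filter_eq_self.mpr
        intro p hp
        simpa using hpieces p hp
      rw [hfilter]
      have hback : PySem.Str.split₀ t
          = (PySem.Chars.split₀ t.toList).map String.ofList := by
        rw [← PySem.Str.split₀_map_toList, List.map_map]
        apply (List.map_id _).symm.trans
        apply List.map_congr_left
        intro p _
        exact (String.ofList_toList (s := p)).symm
      rw [hback, htl]
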